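-- pv_equiv track=rewrite | github.com/shahrooz1997/LEGOstore | source/ABD_Client.py | get_final_value
-- ===== SOURCE A (Python) =====
-- def get_final_value(values):
--     max_time = "0"
--     result = None
--     for data in values:
--         if data[0] != "OK":
--              continue
--         temp_result = data[1]
--         temp_time = data[2]
--         if temp_time > max_time:
--             result = temp_result
--             max_time = temp_time
--
--     return (result, max_time)
-- ===== SOURCE B (Python) =====
-- def get_final_value(values):
--     candidates = [(d[1], d[2]) for d in values if d[0] == "OK"]
--     if not candidates:
--         return (None, "0")
--     best = max(candidates, key=lambda vt: vt[1])
--     if best[1] > "0":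
--         return (best[0], best[1])
--     return (None, "0")
-- ===== Notes on version B (the rewrite author's own statement) =====
-- stated objective: idiomatic
-- what changed: Replaced the single stateful sentinel loop by a filter-candidates pass followed by max(..., key=timestamp) and a final baseline check, preserving string comparison and first-on-ties.
import Mathlib
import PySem

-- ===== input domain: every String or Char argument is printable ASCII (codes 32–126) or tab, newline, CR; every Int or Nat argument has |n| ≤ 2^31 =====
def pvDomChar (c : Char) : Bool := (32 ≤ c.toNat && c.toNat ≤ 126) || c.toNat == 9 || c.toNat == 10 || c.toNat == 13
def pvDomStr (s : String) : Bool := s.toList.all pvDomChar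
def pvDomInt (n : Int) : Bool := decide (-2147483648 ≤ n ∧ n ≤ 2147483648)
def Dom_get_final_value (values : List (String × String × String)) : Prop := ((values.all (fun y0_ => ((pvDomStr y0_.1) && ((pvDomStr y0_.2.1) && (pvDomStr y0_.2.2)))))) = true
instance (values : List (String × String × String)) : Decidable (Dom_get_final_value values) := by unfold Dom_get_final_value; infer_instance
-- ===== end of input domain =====

-- B is a filter-candidates-then-max-by-key decomposition of A's single stateful loop (idiomatic; same cost).

-- ===== PORT A =====
-- literal transliteration of A's loop: state (result, max_time), skip on data[0] != "OK", update on strict >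
def get_final_value (values : List (String × String × String)) : Option String × String :=
  values.foldl
    (fun st data =>
      if data.1 ≠ "OK" then st
      else if st.2 < data.2.2 then (some data.2.1, data.2.2) else st)
    (none, "0")

-- ===== PORT B =====
-- max(candidates, key=vt[1]): keeps the first element on ties (replace only on strictly greater key)
def pyMaxByT (h : String × String) (t : List (String × String)) : String × String :=
  t.foldl (fun b x => if b.2 < x.2 then x else b) h

def get_final_value_alt (values : List (String × String × String)) : Option String × String :=
  let candidates := (values.filter (fun d => d.1 == "OK")).map (fun d => (d.2.1, d.2.2))
  match candidates with
  | [] => (none, "0")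
  | c :: rest =>
    let best := pyMaxByT c rest
    if "0" < best.2 then (some best.1, best.2) else (none, "0")

-- ===== PRECONDITION & SPEC =====
def Spec_get_final_value (values : List (String × String × String)) (out : Option String × String) : Prop := out = get_final_value_alt values
instance (values : List (String × String × String)) (out : Option String × String) : Decidable (Spec_get_final_value values out) := by unfold Spec_get_final_value; infer_instance

-- ===== CLAIM (what is proved, stated in full; the proofs are below) =====
def Claim_equal_get_final_value : Prop := ∀ (values : List (String × String × String)), Dom_get_final_value values → Spec_get_final_value values (get_final_value values)

-- ===== LEMMAS AND PROOFS =====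

-- A's step restricted to the candidate list
def pvStepC (st : Option String × String) (c : String × String) : Option String × String :=
  if st.2 < c.2 then (some c.1, c.2) else st

-- the common normal form both programs compute
def pvCore (cs : List (String × String)) : Option String × String :=
  match cs with
  | [] => (none, "0")
  | c :: rest =>
    if "0" < (pyMaxByT c rest).2 then (some (pyMaxByT c rest).1, (pyMaxByT c rest).2)
    else (none, "0")

theorem pyMaxByT_cons (h c : String × String) (t : List (String × String)) :
    pyMaxByT h (c :: t) = pyMaxByT (if h.2 < c.2 then c else h) t := rfl

theorem pvA_filter (values : List (String × String × String)) (st : Option String × String) :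
    values.foldl
      (fun st data =>
        if data.1 ≠ "OK" then st
        else if st.2 < data.2.2 then (some data.2.1, data.2.2) else st) st
    = ((values.filter (fun d => d.1 == "OK")).map (fun d => (d.2.1, d.2.2))).foldl pvStepC st := by
  induction values generalizing st with
  | nil => rfl
  | cons d tl ih =>
    by_cases h : d.1 = "OK"
    · simp only [List.foldl_cons, List.filter_cons, h]
      exact ih _
    · have hb : (d.1 == "OK") = false := by simp [h]
      simp only [List.foldl_cons, List.filter_cons, hb, Bool.false_eq_true, if_false, ne_eq, h,
        not_false_eq_true, if_true]
      exact ih st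

theorem pvM (cs : List (String × String)) (h : String × String) :
    cs.foldl pvStepC (some h.1, h.2) = (some (pyMaxByT h cs).1, (pyMaxByT h cs).2) := by
  induction cs generalizing h with
  | nil => rfl
  | cons c tl ih =>
    rw [List.foldl_cons, pyMaxByT_cons]
    by_cases hc : h.2 < c.2
    · have hs : pvStepC (some h.1, h.2) c = (some c.1, c.2) := by
        simp only [pvStepC, hc, if_true]
      rw [hs, if_pos hc]
      exact ih c
    · have hs : pvStepC (some h.1, h.2) c = (some h.1, h.2) := by
        simp only [pvStepC, hc, if_false]
      rw [hs, if_neg hc]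
      exact ih h

theorem pvMono (cs : List (String × String)) (h : String × String) :
    h.2 ≤ (pyMaxByT h cs).2 := by
  induction cs generalizing h with
  | nil => exact le_refl _
  | cons c tl ih =>
    rw [pyMaxByT_cons]
    by_cases hc : h.2 < c.2
    · rw [if_pos hc]; exact le_trans (le_of_lt hc) (ih c)
    · rw [if_neg hc]; exact ih h

theorem pvP (cs : List (String × String)) (h1 h2 : String × String)
    (hyp : h1 = h2 ∨ (h1.2 ≤ "0" ∧ h2.2 ≤ "0")) :
    pyMaxByT h1 cs = pyMaxByT h2 cs ∨
      ((pyMaxByT h1 cs).2 ≤ "0" ∧ (pyMaxByT h2 cs).2 ≤ "0") := by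
  induction cs generalizing h1 h2 with
  | nil =>
    rcases hyp with h | h
    · exact Or.inl (by rw [h])
    · exact Or.inr h
  | cons c tl ih =>
    rw [pyMaxByT_cons, pyMaxByT_cons]
    rcases hyp with h | ⟨hle1, hle2⟩
    · subst h; exact ih _ _ (Or.inl rfl)
    · by_cases hc : "0" < c.2
      · have e1 : h1.2 < c.2 := lt_of_le_of_lt hle1 hc
        have e2 : h2.2 < c.2 := lt_of_le_of_lt hle2 hc
        rw [if_pos e1, if_pos e2]
        exact ih _ _ (Or.inl rfl)
      · have hc' : c.2 ≤ "0" := le_of_not_gt hc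
        refine ih _ _ (Or.inr ⟨?_, ?_⟩) <;> split <;> assumption

theorem pvN (cs : List (String × String)) :
    cs.foldl pvStepC (none, "0") = pvCore cs := by
  induction cs with
  | nil => rfl
  | cons c rest ih =>
    rw [List.foldl_cons]
    by_cases hc : ("0" : String) < c.2
    · have hs : pvStepC ((none : Option String), ("0" : String)) c = (some c.1, c.2) := by
        simp only [pvStepC, hc, if_true]
      have hb : ("0" : String) < (pyMaxByT c rest).2 := lt_of_lt_of_le hc (pvMono rest c)
      rw [hs, pvM rest c]
      simp only [pvCore, hb, if_true]
    · have hc' : c.2 ≤ "0" := le_of_not_gt hc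
      have hs : pvStepC ((none : Option String), ("0" : String)) c = (none, "0") := by
        simp only [pvStepC, hc, if_false]
      rw [hs, ih]
      -- show pvCore rest = pvCore (c :: rest) given c.2 ≤ "0"
      cases rest with
      | nil => simp only [pvCore, pyMaxByT, List.foldl_nil, hc, if_false]
      | cons r rs =>
        simp only [pvCore, pyMaxByT_cons]
        by_cases hr : ("0" : String) < r.2
        · have : c.2 < r.2 := lt_of_le_of_lt hc' hr
          rw [if_pos this]
        · have hr' : r.2 ≤ "0" := le_of_not_gt hr
          have hcr : (if c.2 < r.2 then r else c).2 ≤ "0" := by split <;> assumption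
          rcases pvP rs r (if c.2 < r.2 then r else c) (Or.inr ⟨hr', hcr⟩) with h | ⟨ha, hb⟩
          · rw [← h]
          · rw [if_neg (not_lt_of_ge ha), if_neg (not_lt_of_ge hb)]

-- ===== VERDICT (by name: the statement is the Claim_ definition above) =====
theorem get_final_value_spec : Claim_equal_get_final_value := by
  intro values _
  unfold Spec_get_final_value get_final_value get_final_value_alt
  rw [pvA_filter, pvN]
  cases h : (values.filter (fun d => d.1 == "OK")).map (fun d => (d.2.1, d.2.2)) <;>
    simp only [pvCore]
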